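-- pv_equiv track=rewrite | github.com/Nimmo-san/aoc2024 | day9/day9.py | compact_part1
-- ===== SOURCE A (Python) =====
-- def compact_part1(fragment):
--     while '.' in fragment:
--         leftmost = fragment.index('.')
--         num = fragment[::-1].index(next(c for c in reversed(fragment) if c != '.'))
--         rightmost = len(fragment) - 1 - num
--
--         if rightmost > leftmost:
--             fragment[leftmost], fragment[rightmost] = fragment[rightmost], '.'
--         else:
--             break
--     return fragment
-- ===== SOURCE B (Python) =====
-- def compact_part1(fragment):
--     # Two-pointer pass: i walks right over blocks, j walks left over gaps,
--     # swapping the rightmost block into the leftmost gap until they meet.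
--     i, j = 0, len(fragment) - 1
--     while i < j:
--         if fragment[i] != '.':
--             i += 1
--         elif fragment[j] == '.':
--             j -= 1
--         else:
--             fragment[i], fragment[j] = fragment[j], '.'
--             i += 1
--             j -= 1
--     return fragment
-- ===== Notes on version B (the rewrite author's own statement) =====
-- stated objective: alternative
-- what changed: replaces the repeated full-list rescans (membership test, index of leftmost gap, reversed-list scan for rightmost block, each iteration) with a single two-pointer pass from both ends performing the same swaps
-- outside the precondition, e.g. on compact_part1(['.']): A raises StopIteration, B returns ['.']
import Mathlib
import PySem

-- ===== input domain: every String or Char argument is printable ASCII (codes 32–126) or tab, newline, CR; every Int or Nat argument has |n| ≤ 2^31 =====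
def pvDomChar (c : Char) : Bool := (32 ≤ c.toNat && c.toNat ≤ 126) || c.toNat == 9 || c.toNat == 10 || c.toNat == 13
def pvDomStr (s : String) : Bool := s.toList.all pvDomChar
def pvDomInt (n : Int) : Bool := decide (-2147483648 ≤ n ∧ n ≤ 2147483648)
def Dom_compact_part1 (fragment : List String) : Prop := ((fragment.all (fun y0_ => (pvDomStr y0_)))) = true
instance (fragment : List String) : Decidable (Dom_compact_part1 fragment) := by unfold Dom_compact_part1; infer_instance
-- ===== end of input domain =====

-- B replaces A's per-iteration full-list rescans by one two-pointer pass doing the same swaps.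
-- Both A and B mutate `fragment` in place in the same way; the equivalence proved here is about the return value.

-- ===== PORT A =====
-- fuel-guarded while loop; fuel `length+1` is always enough (the index of the leftmost gap strictly increases at each swap).
-- indices `leftmost`, `rightmost`, `num` are nonneg and in range whenever used, so Nat indexing with set/getD is exact here.
def compactALoop : Nat → List String → List String
  | 0, l => l
  | fuel+1, l =>
    if "." ∈ l then
      match PySem.List.index? l "." with
      | none => l        -- unreachable: "." ∈ l
      | some leftmost =>
        -- fragment[::-1] = l.reverse (PySem.List.slice?_none_none_neg_one)
        match l.reverse.find? (fun c => c != ".") with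
        | none => l      -- next(...) raises StopIteration here (excluded by Pre_)
        | some c =>
          match PySem.List.index? l.reverse c with
          | none => l    -- unreachable: c ∈ l.reverse
          | some num =>
            let rightmost := l.length - 1 - num
            if rightmost > leftmost then
              compactALoop fuel ((l.set leftmost (l.getD rightmost "")).set rightmost ".")
            else l
    else l

def compact_part1 (fragment : List String) : List String :=
  compactALoop (fragment.length + 1) fragment

-- ===== PORT B =====
-- two-pointer while loop of Source B; fuel `length` is always enough (j - i decreases every step).
def compactBLoop : Nat → Nat → Nat → List String → List String
  | 0, _, _, l => l
  | fuel+1, i, j, l =>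
    if i < j then
      if l.getD i "" ≠ "." then compactBLoop fuel (i+1) j l
      else if l.getD j "" = "." then compactBLoop fuel i (j-1) l
      else compactBLoop fuel (i+1) (j-1) ((l.set i (l.getD j "")).set j ".")
    else l

def compact_part1_alt (fragment : List String) : List String :=
  compactBLoop fragment.length 0 (fragment.length - 1) fragment

-- ===== PRECONDITION & SPEC =====
-- Pre_ excludes exactly the nonempty all-gap lists, on which A raises StopIteration (B returns them unchanged).
def Pre_compact_part1 (fragment : List String) : Prop :=
  fragment = [] ∨ ∃ x ∈ fragment, x ≠ "."
instance (fragment : List String) : Decidable (Pre_compact_part1 fragment) := by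
  unfold Pre_compact_part1; infer_instance
def pvWitness_compact_part1 : List String := ["0", ".", "1"]

def Spec_compact_part1 (fragment : List String) (out : List String) : Prop := out = compact_part1_alt fragment
instance (fragment : List String) (out : List String) : Decidable (Spec_compact_part1 fragment out) := by unfold Spec_compact_part1; infer_instance

-- ===== CLAIM (what is proved, stated in full; the proofs are below) =====
def Claim_equal_compact_part1 : Prop := ∀ (fragment : List String), Dom_compact_part1 fragment → Pre_compact_part1 fragment → Spec_compact_part1 fragment (compact_part1 fragment)

-- ===== LEMMAS AND PROOFS =====

theorem indexFirst {α : Type} [BEq α] [LawfulBEq α] (l : List α) (v : α) (i : Nat)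
    (hi : i < l.length) (hv : l[i] = v) (hlt : ∀ k (hk : k < l.length), k < i → l[k] ≠ v) :
    PySem.List.index? l v = some i := by
  induction l generalizing i with
  | nil => simp at hi
  | cons x xs ih =>
    cases i with
    | zero =>
      simp only [List.getElem_cons_zero] at hv; subst hv
      exact PySem.List.index?_cons_self _ _
    | succ n =>
      have hx : x ≠ v := by
        have := hlt 0 (by simp) (Nat.succ_pos n)
        simpa using this
      rw [PySem.List.index?_cons_of_ne _ hx]
      have h := ih n (by simpa using hi) (by simpa using hv)
        (fun k hk hkn => by
          have := hlt (k+1) (by simpa using hk) (by omega)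
          simpa using this)
      rw [h]; rfl

theorem findFirst {α : Type} (l : List α) (p : α → Bool) (i : Nat)
    (hi : i < l.length) (hv : p l[i] = true) (hlt : ∀ k (hk : k < l.length), k < i → p l[k] = false) :
    l.find? p = some l[i] := by
  induction l generalizing i with
  | nil => simp at hi
  | cons x xs ih =>
    cases i with
    | zero => simp only [List.getElem_cons_zero] at hv ⊢; simp [hv]
    | succ n =>
      have hx : p x = false := by
        have := hlt 0 (by simp) (Nat.succ_pos n)
        simpa using this
      simp only [List.getElem_cons_succ, List.find?_cons, hx]
      exact ih n (by simpa using hi) (by simpa using hv)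
        (fun k hk hkn => by
          have := hlt (k+1) (by simpa using hk) (by omega)
          simpa using this)

def muA (l : List String) : Nat :=
  match PySem.List.index? l "." with
  | none => 0
  | some t => l.length - t

theorem muA_swap (l : List String) (lm rm : Nat) (hlm : PySem.List.index? l "." = some lm)
    (hrm : rm < l.length) (hne : l[rm] ≠ ".") (hgt : lm < rm) :
    muA ((l.set lm (l.getD rm "")).set rm ".") < muA l := by
  obtain ⟨hlml, hlmv, hlmf⟩ := PySem.List.getElem_of_index?_eq_some hlm
  set l' := (l.set lm (l.getD rm "")).set rm "." with hl'
  have hlen : l'.length = l.length := by simp [hl']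
  have hmu : muA l = l.length - lm := by unfold muA; rw [hlm]
  have hkey : ∀ t (ht : t < l'.length), l'[t] = "." → lm < t := by
    intro t ht hv
    simp only [hl', List.getElem_set] at hv
    rcases eq_or_ne rm t with rfl | hrt
    · omega
    · simp only [if_neg hrt] at hv
      rcases eq_or_ne lm t with rfl | hlt
      · rw [if_pos rfl, List.getD_eq_getElem _ _ hrm] at hv
        exact (hne hv).elim
      · rw [if_neg hlt] at hv
        rcases Nat.lt_or_ge lm t with h | h
        · exact h
        · exact absurd hv (hlmf t (by omega))
  rw [hmu]
  unfold muA
  cases hidx : PySem.List.index? l' "." with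
  | none =>
    show (0:Nat) < l.length - lm
    omega
  | some t =>
    obtain ⟨ht, htv, _⟩ := PySem.List.getElem_of_index?_eq_some hidx
    have h2 := hkey t ht htv
    show l'.length - t < l.length - lm
    rw [hlen] at ht ⊢
    omega


theorem compactALoop_not_mem (f : Nat) (l : List String) (h : "." ∉ l) :
    compactALoop (f+1) l = l := by
  simp only [compactALoop, if_neg h]

theorem compactALoop_step (f : Nat) (l : List String) (lm num : Nat) (c : String)
    (hmem : "." ∈ l) (hidx : PySem.List.index? l "." = some lm)
    (hfind : l.reverse.find? (fun c => c != ".") = some c)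
    (hidx2 : PySem.List.index? l.reverse c = some num) :
    compactALoop (f+1) l =
      if l.length - 1 - num > lm then
        compactALoop f ((l.set lm (l.getD (l.length - 1 - num) "")).set (l.length - 1 - num) ".")
      else l := by
  simp only [compactALoop, if_pos hmem, hidx, hfind, hidx2]

theorem compactALoop_exit (fa i j : Nat) (l : List String)
    (hinv1 : ∀ k (hk : k < l.length), k < i → l[k] ≠ ".")
    (hinv2 : ∀ k (hk : k < l.length), j < k → l[k] = ".")
    (hex : ∃ x ∈ l, x ≠ ".") (hij : j ≤ i) :
    compactALoop (fa+1) l = l := by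
  by_cases hmem : "." ∈ l
  · cases hidx : PySem.List.index? l "." with
    | none => rw [PySem.List.index?_eq_none_iff] at hidx; exact absurd hmem hidx
    | some lm =>
      obtain ⟨hlml, hlmv, _⟩ := PySem.List.getElem_of_index?_eq_some hidx
      have hilm : i ≤ lm := by
        by_contra h
        exact hinv1 lm hlml (by omega) hlmv
      obtain ⟨x, hxl, hxne⟩ := hex
      have hfs : (l.reverse.find? (fun c => c != ".")).isSome :=
        List.find?_isSome.mpr ⟨x, by simpa using hxl, by simpa using hxne⟩
      obtain ⟨c, hfind⟩ := Option.isSome_iff_exists.mp hfs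
      obtain ⟨hpc, as, bs, hsplit, hfail⟩ := List.find?_eq_some_iff_append.mp hfind
      have hcne : c ≠ "." := by simpa using hpc
      have hclen : as.length < l.reverse.length := by rw [hsplit]; simp
      have hrevget : l.reverse[as.length]'hclen = c := by
        simp only [hsplit]
        rw [List.getElem_append_right (Nat.le_refl _)]
        simp
      have hidx2 : PySem.List.index? l.reverse c = some as.length := by
        apply indexFirst _ _ _ hclen hrevget
        intro k hk hklt
        have hmemas : l.reverse[k] ∈ as := by
          have : l.reverse[k] = as[k]'hklt := by
            simp only [hsplit]
            rw [List.getElem_append_left hklt]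
          rw [this]; exact List.getElem_mem hklt
        have := hfail _ hmemas
        simp only [Bool.not_eq_eq_eq_not, Bool.not_true, bne_eq_false_iff_eq] at this
        rw [this]
        exact fun h => hcne h.symm
      rw [compactALoop_step fa l lm as.length c hmem hidx hfind hidx2]
      have hlen0 : l.length = l.reverse.length := (List.length_reverse).symm
      have hrm : l.length - 1 - as.length ≤ j := by
        by_contra h
        have hrmlen : l.length - 1 - as.length < l.length := by omega
        have h2 := hinv2 _ hrmlen (by omega)
        have h3 : l[l.length - 1 - as.length]'hrmlen = c := by
          rw [← hrevget, List.getElem_reverse]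
        rw [h2] at h3
        exact hcne h3.symm
      rw [if_neg (by omega)]
  · exact compactALoop_not_mem fa l hmem

theorem simB (fb : Nat) : ∀ (fa i j : Nat) (l : List String),
    (∀ k (hk : k < l.length), k < i → l[k] ≠ ".") →
    (∀ k (hk : k < l.length), j < k → l[k] = ".") →
    (∃ x ∈ l, x ≠ ".") →
    j < l.length → j - i < fb → muA l < fa →
    compactBLoop fb i j l = compactALoop fa l := by
  induction fb with
  | zero => intro fa i j l _ _ _ _ hfb _; omega
  | succ fb ih =>
    intro fa i j l hinv1 hinv2 hex hj hfb hfa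
    cases fa with
    | zero => omega
    | succ fa' =>
      by_cases hij : i < j
      · have hiL : i < l.length := by omega
        by_cases hci : l.getD i "" ≠ "."
        · -- advance i
          have hred : compactBLoop (fb+1) i j l = compactBLoop fb (i+1) j l := by
            simp only [compactBLoop, if_pos hij, if_pos hci]
          rw [hred]
          apply ih (fa'+1) (i+1) j l ?_ hinv2 hex hj (by omega) hfa
          intro k hk hki
          rcases Nat.lt_or_ge k i with h | h
          · exact hinv1 k hk h
          · have hk2 : k = i := by omega
            subst hk2
            rw [List.getD_eq_getElem _ _ hk] at hci
            exact hci
        · simp only [ne_eq, not_not] at hci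
          have hciv : l[i]'hiL = "." := by rw [List.getD_eq_getElem _ _ hiL] at hci; exact hci
          by_cases hcj : l.getD j "" = "."
          · -- retreat j
            have hcjv : l[j]'hj = "." := by rw [List.getD_eq_getElem _ _ hj] at hcj; exact hcj
            have hred : compactBLoop (fb+1) i j l = compactBLoop fb i (j-1) l := by
              simp only [compactBLoop, if_pos hij]
              rw [if_neg (fun h => h hci), if_pos hcj]
            rw [hred]
            apply ih (fa'+1) i (j-1) l hinv1 ?_ hex (by omega) (by omega) hfa
            intro k hk hkj
            rcases Nat.lt_or_ge j k with h | h
            · exact hinv2 k hk h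
            · have hk2 : k = j := by omega
              subst hk2
              exact hcjv
          · -- swap
            have hcjv : l[j]'hj ≠ "." := fun h => hcj (by rw [List.getD_eq_getElem _ _ hj]; exact h)
            have hmem : "." ∈ l := hciv ▸ List.getElem_mem hiL
            have hred : compactBLoop (fb+1) i j l =
                compactBLoop fb (i+1) (j-1) ((l.set i (l.getD j "")).set j ".") := by
              simp only [compactBLoop, if_pos hij]
              rw [if_neg (fun h => h hci), if_neg hcj]
            have hidx : PySem.List.index? l "." = some i := indexFirst l "." i hiL hciv hinv1
            have hjlen1 : l.length - 1 - (l.length - 1 - j) = j := by omega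
            have hrevlen : l.length - 1 - j < l.reverse.length := by
              rw [List.length_reverse]; omega
            have hrevj : l.reverse[l.length - 1 - j]'hrevlen = l[j]'hj := by
              rw [List.getElem_reverse]
              simp only [hjlen1]
            have hfind : l.reverse.find? (fun c => c != ".") = some (l[j]'hj) := by
              have := findFirst l.reverse (fun c => c != ".") (l.length - 1 - j) hrevlen
                (by rw [hrevj]; simpa using hcjv)
                (fun k hk hklt => by
                  rw [List.getElem_reverse]
                  have h2 := hinv2 (l.length - 1 - k) (by rw [List.length_reverse] at hk; omega)
                    (by rw [List.length_reverse] at hk; omega)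
                  rw [h2]
                  simp)
              rw [this, hrevj]
            have hidx2 : PySem.List.index? l.reverse (l[j]'hj) = some (l.length - 1 - j) := by
              apply indexFirst _ _ _ hrevlen hrevj
              intro k hk hklt
              rw [List.getElem_reverse]
              have h2 := hinv2 (l.length - 1 - k) (by rw [List.length_reverse] at hk; omega)
                (by rw [List.length_reverse] at hk; omega)
              rw [h2]
              exact fun h => hcjv h.symm
            rw [hred, compactALoop_step fa' l i (l.length - 1 - j) (l[j]'hj) hmem hidx hfind hidx2,
               hjlen1, if_pos hij]
            have hmu : muA l = l.length - i := by unfold muA; rw [hidx]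
            have hmusw := muA_swap l i j hidx hj hcjv hij
            have hlen' : ((l.set i (l.getD j "")).set j ".").length = l.length := by simp
            apply ih fa' (i+1) (j-1) _ ?_ ?_ ?_ (by rw [hlen']; omega) (by omega) (by omega)
            · intro k hk hki1
              rw [List.getElem_set_ne (by omega)]
              rcases Nat.lt_or_ge k i with h | h
              · rw [List.getElem_set_ne (by omega)]
                exact hinv1 k (by rw [hlen'] at hk; exact hk) h
              · have hk2 : k = i := by omega
                subst hk2
                rw [List.getElem_set_self, List.getD_eq_getElem _ _ hj]
                exact hcjv
            · intro k hk hkj1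
              rcases Nat.lt_or_ge j k with h | h
              · rw [List.getElem_set_ne (by omega), List.getElem_set_ne (by omega)]
                exact hinv2 k (by rw [hlen'] at hk; exact hk) h
              · have hk2 : k = j := by omega
                subst hk2
                rw [List.getElem_set_self]
            · refine ⟨((l.set i (l.getD j "")).set j ".")[i]'(by rw [hlen']; omega), List.getElem_mem _, ?_⟩
              rw [List.getElem_set_ne (by omega), List.getElem_set_self, List.getD_eq_getElem _ _ hj]
              exact hcjv
      · have hred : compactBLoop (fb+1) i j l = l := by
          simp only [compactBLoop, if_neg hij]
        rw [hred, compactALoop_exit fa' i j l hinv1 hinv2 hex (by omega)]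

-- ===== VERDICT (by name: the statement is the Claim_ definition above) =====
theorem compact_part1_spec : Claim_equal_compact_part1 := by
  intro fragment _ hpre
  unfold Spec_compact_part1 compact_part1 compact_part1_alt
  cases fragment with
  | nil => simp [compactALoop, compactBLoop]
  | cons x xs =>
    rcases hpre with h | hex
    · exact absurd h (by simp)
    · refine (simB (x :: xs).length (((x :: xs).length) + 1) 0 ((x :: xs).length - 1) (x :: xs)
        (by intro k hk h; omega) (by intro k hk h; omega) hex (by simp) (by simp) ?_).symm
      have : muA (x :: xs) ≤ (x :: xs).length := by
        unfold muA
        cases h : PySem.List.index? (x :: xs) "." with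
        | none => show (0:Nat) ≤ (x :: xs).length; omega
        | some t => show (x :: xs).length - t ≤ (x :: xs).length; omega
      omega
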